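-- pv_equiv track=rewrite | github.com/7unho/TIL_algo_solution | 프로그래머스/1/250137. ［PCCP 기출문제］ 1번 ／ 붕대 감기/［PCCP 기출문제］ 1번 ／ 붕대 감기.py | solution
-- ===== SOURCE A (Python) =====
-- def solution(bandage, health, attacks):
--     answer = health
--     lastAttacked = 0
--     for time, damage in attacks:
--         answer = doHeal(answer, time, bandage, lastAttacked, health)
--         if isGameOver(answer, damage): return -1
--         answer, lastAttacked = doAttack(answer, time, lastAttacked, damage)
--
--     return answer if answer > 0 else -1
--
-- def isGameOver(health, damage) -> bool: # 현재 체력이 0 이하가 되었다면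
--     return health - damage <= 0
--
-- def doHeal(answer, time, bandage, lastAttacked, health):
--     successTime = (time - 1) - lastAttacked
--     return min(health, answer + (successTime // bandage[0]) * bandage[2] + successTime * bandage[1])
--
-- def doAttack(answer, time, lastAttacked, damage):
--     answer -= damage
--     lastAttacked = time
--     return answer, lastAttacked
-- ===== SOURCE B (Python) =====
-- def solution(bandage, health, attacks):
--     # Prefix-sum reformulation: unrolling hp_k = min(health, hp_{k-1} + heal_k) - d_k
--     # gives the closed form hp_k = health + P_k - M_k, where P is the prefix sum of
--     # net changes (heal - damage) and M is the running max of (P_{k-1} + heal_k)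
--     # floored at 0.  Death occurs iff the running minimum `low` of P_k - M_k ever
--     # makes health + low <= 0, so no clamped hp variable and no early exit are needed.
--     P = 0
--     M = 0
--     low = None
--     prev = 0
--     for t, d in attacks:
--         gap = t - 1 - prev
--         heal = gap * bandage[1] + (gap // bandage[0]) * bandage[2]
--         M = max(M, P + heal)
--         P += heal - d
--         low = P - M if low is None else min(low, P - M)
--         prev = t
--     if low is None:
--         return health if health > 0 else -1
--     return health + P - M if health + low > 0 else -1
-- ===== Notes on version B (the rewrite author's own statement) =====
-- stated objective: alternative
-- what changed: B drops A's clamped-hp recurrence and early returns entirely: it unrolls hp_k = min(health, hp_{k-1}+heal_k) - d_k into the closed form health + P_k - M_k (P = prefix sum of heal-damage, M = running max of P_{k-1}+heal_k floored at 0) and detects death via a running minimum of P_k - M_k checked once at the end.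
import Mathlib
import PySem

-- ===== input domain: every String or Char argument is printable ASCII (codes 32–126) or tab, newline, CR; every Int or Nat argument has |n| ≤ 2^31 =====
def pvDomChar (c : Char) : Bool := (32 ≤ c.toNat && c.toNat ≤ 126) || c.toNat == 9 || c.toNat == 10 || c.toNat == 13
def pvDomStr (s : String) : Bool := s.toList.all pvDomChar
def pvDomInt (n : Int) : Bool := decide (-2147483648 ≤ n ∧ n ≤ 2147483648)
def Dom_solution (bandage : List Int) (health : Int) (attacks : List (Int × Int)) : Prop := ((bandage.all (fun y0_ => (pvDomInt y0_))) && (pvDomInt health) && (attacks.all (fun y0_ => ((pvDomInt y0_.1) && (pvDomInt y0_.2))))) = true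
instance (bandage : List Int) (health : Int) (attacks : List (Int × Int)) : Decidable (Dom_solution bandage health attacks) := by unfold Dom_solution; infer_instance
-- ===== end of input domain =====

-- B replaces A's clamped-hp loop with early returns by a prefix-sum / running-max
-- closed form (hp_k = health + P_k - M_k) plus a running minimum for the death test
-- (objective: alternative).


-- ===== PORT A =====
def isGameOver (health damage : Int) : Bool := health - damage ≤ 0

def doHeal (answer time : Int) (bandage : List Int) (lastAttacked health : Int) : Int :=
  let successTime := (time - 1) - lastAttacked
  min health (answer
    + (PySem.Int.floordiv successTime ((PySem.List.pyGet? bandage 0).getD 0))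
        * ((PySem.List.pyGet? bandage 2).getD 0)
    + successTime * ((PySem.List.pyGet? bandage 1).getD 0))

def doAttack (answer time lastAttacked damage : Int) : Int × Int :=
  (answer - damage, time)

-- the for-loop of A with its two early returns, state (answer, lastAttacked)
def solutionLoop (bandage : List Int) (health : Int) :
    List (Int × Int) → Int → Int → Int
  | [], answer, _ => if answer > 0 then answer else -1
  | (time, damage) :: rest, answer, lastAttacked =>
    let answer := doHeal answer time bandage lastAttacked health
    if isGameOver answer damage then -1
    else
      let p := doAttack answer time lastAttacked damage
      solutionLoop bandage health rest p.1 p.2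

def solution (bandage : List Int) (health : Int) (attacks : List (Int × Int)) : Int :=
  solutionLoop bandage health attacks health 0

-- ===== PORT B =====
-- one step of Source B's loop; state (P, M, low, prev)
def stepB (bandage : List Int) (st : Int × Int × Option Int × Int)
    (a : Int × Int) : Int × Int × Option Int × Int :=
  let gap := a.1 - 1 - st.2.2.2
  let heal := gap * ((PySem.List.pyGet? bandage 1).getD 0)
    + (PySem.Int.floordiv gap ((PySem.List.pyGet? bandage 0).getD 0))
        * ((PySem.List.pyGet? bandage 2).getD 0)
  let M := max st.2.1 (st.1 + heal)
  let P := st.1 + heal - a.2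
  let low : Option Int := match st.2.2.1 with
    | none => some (P - M)
    | some l => some (min l (P - M))
  (P, M, low, a.1)

def solution_alt (bandage : List Int) (health : Int) (attacks : List (Int × Int)) : Int :=
  let st := attacks.foldl (stepB bandage) (0, 0, none, 0)
  match st.2.2.1 with
  | none => if health > 0 then health else -1
  | some low => if health + low > 0 then health + st.1 - st.2.1 else -1

-- ===== PRECONDITION & SPEC =====
-- Pre_ excludes exactly the inputs on which the Python A raises: with a nonempty
-- attack list, bandage shorter than 3 (IndexError) or bandage[0] = 0 (ZeroDivisionError).
def Pre_solution (bandage : List Int) (health : Int) (attacks : List (Int × Int)) : Prop :=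
  attacks = [] ∨ (3 ≤ bandage.length ∧ (PySem.List.pyGet? bandage 0).getD 0 ≠ 0)
instance (bandage : List Int) (health : Int) (attacks : List (Int × Int)) : Decidable (Pre_solution bandage health attacks) := by unfold Pre_solution; infer_instance

def pvWitness_solution : List Int × Int × (List (Int × Int)) := ([3, 2, 7], 30, [(1, 15), (5, 20), (8, 2)])

def Spec_solution (bandage : List Int) (health : Int) (attacks : List (Int × Int)) (out : Int) : Prop := out = solution_alt bandage health attacks
instance (bandage : List Int) (health : Int) (attacks : List (Int × Int)) (out : Int) : Decidable (Spec_solution bandage health attacks out) := by unfold Spec_solution; infer_instance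

-- ===== CLAIM (what is proved, stated in full; the proofs are below) =====
def Claim_equal_solution : Prop := ∀ (bandage : List Int) (health : Int) (attacks : List (Int × Int)), Dom_solution bandage health attacks → Pre_solution bandage health attacks → Spec_solution bandage health attacks (solution bandage health attacks)

-- ===== LEMMAS AND PROOFS =====

-- B's low component stays `some` and only decreases along the fold
theorem foldB_low_mono (bandage : List Int) :
    ∀ (rest : List (Int × Int)) (P M l prev : Int),
      ∃ l', (rest.foldl (stepB bandage) (P, M, some l, prev)).2.2.1 = some l' ∧ l' ≤ l := by
  intro rest
  induction rest with
  | nil => intro P M l prev; exact ⟨l, rfl, le_refl l⟩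
  | cons a r ih =>
    intro P M l prev
    simp only [List.foldl_cons, stepB]
    obtain ⟨l', h, hle⟩ := ih _ _ _ a.1
    exact ⟨l', h, le_trans hle (min_le_left _ _)⟩

-- one B step's heal equals A's doHeal summand, and the closed form advances
theorem heal_eq (bandage : List Int) (answer health P M prev t : Int)
    (hA : answer = health + P - M) :
    doHeal answer t bandage prev health
      = health + (P + ((t - 1 - prev) * ((PySem.List.pyGet? bandage 1).getD 0)
          + (PySem.Int.floordiv (t - 1 - prev) ((PySem.List.pyGet? bandage 0).getD 0))
              * ((PySem.List.pyGet? bandage 2).getD 0)))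
        - max M (P + ((t - 1 - prev) * ((PySem.List.pyGet? bandage 1).getD 0)
          + (PySem.Int.floordiv (t - 1 - prev) ((PySem.List.pyGet? bandage 0).getD 0))
              * ((PySem.List.pyGet? bandage 2).getD 0))) := by
  subst hA
  dsimp only [doHeal]
  omega

-- main loop correspondence: A's loop from the closed-form state equals B's fold readout
theorem loop_eq (bandage : List Int) (health : Int) :
    ∀ (rest : List (Int × Int)) (P M l prev : Int),
      health + l > 0 → l ≤ P - M →
      solutionLoop bandage health rest (health + P - M) prev
        = (match (rest.foldl (stepB bandage) (P, M, some l, prev)).2.2.1 with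
           | none => if health > 0 then health else -1
           | some low => if health + low > 0
               then health + (rest.foldl (stepB bandage) (P, M, some l, prev)).1
                 - (rest.foldl (stepB bandage) (P, M, some l, prev)).2.1
               else -1) := by
  intro rest
  induction rest with
  | nil =>
    intro P M l prev hl hle
    simp only [List.foldl_nil, solutionLoop]
    rw [if_pos (by omega), if_pos (by omega)]
  | cons a r ih =>
    intro P M l prev hl hle
    obtain ⟨t, d⟩ := a
    obtain ⟨heal, hheal⟩ : ∃ x : Int, x = (t - 1 - prev) * ((PySem.List.pyGet? bandage 1).getD 0)
      + (PySem.Int.floordiv (t - 1 - prev) ((PySem.List.pyGet? bandage 0).getD 0))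
          * ((PySem.List.pyGet? bandage 2).getD 0) := ⟨_, rfl⟩
    have hstep : stepB bandage (P, M, some l, prev) (t, d)
        = (P + heal - d, max M (P + heal), some (min l (P + heal - d - max M (P + heal))), t) := by
      simp only [stepB, ← hheal]
    have hdo : doHeal (health + P - M) t bandage prev health
        = health + (P + heal) - max M (P + heal) := by
      rw [hheal]; exact heal_eq bandage _ health P M prev t rfl
    simp only [solutionLoop, List.foldl_cons, hstep]
    by_cases hdead : health + (P + heal) - max M (P + heal) - d ≤ 0
    · rw [if_pos (by simp only [isGameOver, hdo, decide_eq_true_eq]; omega)]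
      obtain ⟨l', hfold, hle'⟩ := foldB_low_mono bandage r
        (P + heal - d) (max M (P + heal)) (min l (P + heal - d - max M (P + heal))) t
      rw [hfold]
      have hneg : ¬ (health + l' > 0) := by
        have h2 := min_le_right l (P + heal - d - max M (P + heal))
        omega
      simp [hneg]
    · rw [if_neg (by simp only [isGameOver, hdo, decide_eq_true_eq]; omega)]
      have harg : doAttack (doHeal (health + P - M) t bandage prev health) t prev d
          = (health + (P + heal - d) - max M (P + heal), t) := by
        simp only [doAttack, hdo, Prod.mk.injEq]
        exact ⟨by omega, trivial⟩
      rw [harg]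
      exact ih (P + heal - d) (max M (P + heal))
        (min l (P + heal - d - max M (P + heal))) t (by omega) (by omega)

-- ===== VERDICT (by name: the statement is the Claim_ definition above) =====
theorem solution_spec : Claim_equal_solution := by
  intro bandage health attacks _ hpre
  unfold Spec_solution solution solution_alt
  cases attacks with
  | nil => simp [solutionLoop]
  | cons a rest =>
    obtain ⟨t, d⟩ := a
    obtain ⟨heal, hheal⟩ : ∃ x : Int, x = (t - 1 - 0) * ((PySem.List.pyGet? bandage 1).getD 0)
      + (PySem.Int.floordiv (t - 1 - 0) ((PySem.List.pyGet? bandage 0).getD 0))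
          * ((PySem.List.pyGet? bandage 2).getD 0) := ⟨_, rfl⟩
    have hstep : stepB bandage (0, 0, none, 0) (t, d)
        = (heal - d, max 0 heal, some (heal - d - max 0 heal), t) := by
      simp only [stepB, ← hheal]
      norm_num
    have hdo : doHeal health t bandage 0 health
        = health + (0 + heal) - max 0 heal := by
      rw [hheal]
      have h := heal_eq bandage health health 0 0 0 t (by ring)
      omega
    simp only [solutionLoop, List.foldl_cons, hstep]
    by_cases hdead : health + (0 + heal) - max 0 heal - d ≤ 0
    · rw [if_pos (by simp only [isGameOver, hdo, decide_eq_true_eq]; omega)]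
      obtain ⟨l', hfold, hle'⟩ := foldB_low_mono bandage rest
        (heal - d) (max 0 heal) (heal - d - max 0 heal) t
      rw [hfold]
      have hneg : ¬ (health + l' > 0) := by omega
      simp [hneg]
    · rw [if_neg (by simp only [isGameOver, hdo, decide_eq_true_eq]; omega)]
      have harg : doAttack (doHeal health t bandage 0 health) t 0 d
          = (health + (heal - d) - max 0 heal, t) := by
        simp only [doAttack, hdo, Prod.mk.injEq]
        exact ⟨by omega, trivial⟩
      rw [harg]
      have := loop_eq bandage health rest (heal - d) (max 0 heal)
        (heal - d - max 0 heal) t (by omega) (by omega)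
      simpa using this
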